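-- pv_equiv track=rewrite | github.com/MezentsevIlya/Introduction-in-Reinforcement-Learning-Sutton-Barto | chapter 5/blackjack.py | count_cards_sum
-- ===== SOURCE A (Python) =====
-- def count_cards_sum(cards_array):
--     cards = cards_array.copy()
--     cards_sum = sum(cards)
--     while cards_sum > 21:
--         if 11 not in cards:
--             break
--         else:
--             cards_sum -= 10
--             cards.remove(11)
--     return cards_sum
-- ===== SOURCE B (Python) =====
-- def count_cards_sum(cards_array):
--     s = sum(cards_array)
--     need = max(0, (s - 12) // 10)
--     return s - 10 * min(cards_array.count(11), need)
-- ===== Notes on version B (the rewrite author's own statement) =====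
-- stated objective: simpler
-- what changed: Replaced the while loop (membership test + list.remove each iteration) by a loop-free closed form: sum once, count aces once, and subtract 10*min(ace_count, ceil((sum-21)/10)).
import Mathlib
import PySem

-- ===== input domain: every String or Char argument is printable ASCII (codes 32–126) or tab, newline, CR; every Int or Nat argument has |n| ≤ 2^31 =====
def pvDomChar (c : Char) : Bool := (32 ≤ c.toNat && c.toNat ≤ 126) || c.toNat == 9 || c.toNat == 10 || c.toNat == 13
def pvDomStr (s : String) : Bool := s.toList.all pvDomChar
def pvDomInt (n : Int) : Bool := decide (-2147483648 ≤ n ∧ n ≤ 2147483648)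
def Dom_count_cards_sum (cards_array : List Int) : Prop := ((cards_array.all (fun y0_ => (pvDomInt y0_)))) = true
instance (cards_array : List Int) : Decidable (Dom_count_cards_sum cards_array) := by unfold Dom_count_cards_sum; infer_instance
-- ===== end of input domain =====

-- B replaces A's while loop (membership test + list.remove each iteration) by a
-- loop-free closed form: sum, ace count, and one arithmetic formula (objective: simpler).

-- ===== PORT A =====
-- the while loop of A: state (cards, cards_sum); each iteration removes one 11
def count_cards_sum_loop (cards : List Int) (cards_sum : Int) : Int :=
  if cards_sum > 21 then
    if (11 : Int) ∉ cards then cards_sum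
    else count_cards_sum_loop ((PySem.List.remove? cards 11).getD cards) (cards_sum - 10)
  else cards_sum
termination_by cards.length
decreasing_by
  rename_i _h1 h2
  rw [not_not] at h2
  rw [PySem.List.remove?_eq_some_erase _ _ h2]
  have h3 := List.length_erase_of_mem h2
  have h4 : 0 < cards.length := List.length_pos_of_mem h2
  simp only [Option.getD_some, h3]
  omega

def count_cards_sum (cards_array : List Int) : Int :=
  count_cards_sum_loop cards_array cards_array.sum

-- ===== PORT B =====
def count_cards_sum_alt (cards_array : List Int) : Int :=
  let s := cards_array.sum
  let need := max 0 (PySem.Int.floordiv (s - 12) 10)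
  s - 10 * min (cards_array.count 11 : Int) need

-- ===== PRECONDITION & SPEC =====
def Spec_count_cards_sum (cards_array : List Int) (out : Int) : Prop := out = count_cards_sum_alt cards_array
instance (cards_array : List Int) (out : Int) : Decidable (Spec_count_cards_sum cards_array out) := by unfold Spec_count_cards_sum; infer_instance

-- ===== CLAIM =====
def Claim_equal_count_cards_sum : Prop := ∀ (cards_array : List Int), Dom_count_cards_sum cards_array → Spec_count_cards_sum cards_array (count_cards_sum cards_array)

-- ===== LEMMAS AND PROOFS =====
-- `need s` = number of 10-point reductions required to reach ≤ 21, if unlimited aces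
def pvNeed (s : Int) : Int := max 0 (PySem.Int.floordiv (s - 12) 10)

lemma pvNeed_nonneg (s : Int) : 0 ≤ pvNeed s := le_max_left _ _

lemma pvNeed_nonpos {s : Int} (h : s ≤ 21) : pvNeed s = 0 := by
  unfold pvNeed
  rw [PySem.Int.floordiv_eq_ediv_of_pos (by norm_num)]
  omega

lemma pvNeed_pos {s : Int} (h : s > 21) : pvNeed s ≥ 1 := by
  unfold pvNeed
  rw [PySem.Int.floordiv_eq_ediv_of_pos (by norm_num)]
  omega

lemma pvNeed_sub10 {s : Int} (h : s > 21) : pvNeed (s - 10) = pvNeed s - 1 := by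
  unfold pvNeed
  rw [PySem.Int.floordiv_eq_ediv_of_pos (by norm_num), PySem.Int.floordiv_eq_ediv_of_pos (by norm_num)]
  omega

-- main loop characterisation
lemma loop_closed (k : Nat) (cards : List Int) (s : Int) (hk : cards.count 11 = k) :
    count_cards_sum_loop cards s = s - 10 * min (cards.count 11 : Int) (pvNeed s) := by
  induction k generalizing cards s with
  | zero =>
    rw [count_cards_sum_loop.eq_def]
    have hnm : (11 : Int) ∉ cards := by
      intro hm
      have := List.count_pos_iff.mpr hm
      omega
    by_cases hs : s > 21
    · have := pvNeed_nonneg s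
      simp only [hs, if_true, hnm, not_false_eq_true, if_true, hk]
      push_cast
      omega
    · have := pvNeed_nonpos (s := s) (by omega)
      have h0 : (0:Int) ≤ (cards.count 11 : Int) := by positivity
      simp only [hs, if_false]
      omega
  | succ n ih =>
    have hm : (11 : Int) ∈ cards := by
      by_contra hnm
      rw [List.count_eq_zero_of_not_mem hnm] at hk; omega
    rw [count_cards_sum_loop.eq_def]
    by_cases hs : s > 21
    · simp only [hs, if_true, hm, not_true_eq_false, if_false]
      rw [PySem.List.remove?_eq_some_erase _ _ hm]
      simp only [Option.getD_some]
      have hc : (cards.erase 11).count 11 = n := by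
        rw [List.count_erase_self]; omega
      rw [ih _ _ hc, hc, pvNeed_sub10 hs]
      have h1 := pvNeed_pos hs
      rw [hk]
      push_cast
      omega
    · have := pvNeed_nonpos (s := s) (by omega)
      have h0 : (0:Int) ≤ (cards.count 11 : Int) := by positivity
      simp only [hs, if_false]
      omega

-- ===== VERDICT =====
theorem count_cards_sum_spec : Claim_equal_count_cards_sum := by
  intro cards _
  unfold Spec_count_cards_sum count_cards_sum count_cards_sum_alt
  rw [loop_closed (cards.count 11) cards cards.sum rfl]
  rfl
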